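-- pv_equiv track=rewrite | github.com/qhapaq-49/kowloon | script/glicine2pos.py | hands2bin
-- ===== SOURCE A (Python) =====
-- def hands2bin(hands):
--     # 手札の0/1を2進数に変換
--     output = 0
--     tmp = 16
--     for i in range(52):
--         if i in hands :
--             output += tmp
--         tmp = tmp * 2
--     jokerbit = tmp * 16
--     if 52 in hands:
--         output += jokerbit
--     return output
-- ===== SOURCE B (Python) =====
-- def hands2bin(hands):
--     s = set(hands)
--     output = sum(1 << (c + 4) for c in s if 0 <= c < 52)
--     if 52 in s:
--         output += 1 << 60
--     return output
-- ===== Notes on version B (the rewrite author's own statement) =====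
-- stated objective: idiomatic
-- what changed: B iterates over the deduplicated cards actually in the hand and shifts each into its bit (data-directed sum over set(hands)), instead of A's position-directed scan of all 52 slots with a running power-of-two accumulator and an 'i in hands' membership test per slot.
import Mathlib
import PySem

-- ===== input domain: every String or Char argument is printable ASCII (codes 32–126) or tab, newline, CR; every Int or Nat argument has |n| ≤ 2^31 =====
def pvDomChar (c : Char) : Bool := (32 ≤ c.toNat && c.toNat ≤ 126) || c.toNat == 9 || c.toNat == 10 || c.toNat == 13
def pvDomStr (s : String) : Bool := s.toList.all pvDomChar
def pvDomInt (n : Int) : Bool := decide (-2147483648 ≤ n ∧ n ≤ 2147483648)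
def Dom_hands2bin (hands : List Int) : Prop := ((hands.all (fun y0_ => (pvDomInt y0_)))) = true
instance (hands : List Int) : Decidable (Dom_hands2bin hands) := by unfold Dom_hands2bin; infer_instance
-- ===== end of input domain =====

-- B replaces A's 52-slot scan by an idiomatic sum over the deduplicated cards present in the hand.

-- ===== PORT A =====
def hands2bin (hands : List Int) : Int :=
  let st := (PySem.List.pyRange 0 52 1).foldl
    (fun (st : Int × Int) i => (if i ∈ hands then st.1 + st.2 else st.1, st.2 * 2)) (0, 16)
  let jokerbit := st.2 * 16
  if (52 : Int) ∈ hands then st.1 + jokerbit else st.1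

-- ===== PORT B =====
-- sum(1 << (c + 4) for c in s if 0 <= c < 52): the guard makes the shift count
-- nonnegative, so '1 << (c+4)' is exactly 2 ^ (c+4).toNat.
def hands2bin_alt (hands : List Int) : Int :=
  let s : PySem.Set Int := PySem.Set.ofList hands
  let output := s.foldl (fun acc c => if 0 ≤ c ∧ c < 52 then acc + 2 ^ (c + 4).toNat else acc) 0
  if PySem.Set.contains s 52 then output + 2 ^ 60 else output

-- ===== PRECONDITION & SPEC =====
def Spec_hands2bin (hands : List Int) (out : Int) : Prop := out = hands2bin_alt hands
instance (hands : List Int) (out : Int) : Decidable (Spec_hands2bin hands out) := by unfold Spec_hands2bin; infer_instance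

-- ===== CLAIM (what is proved, stated in full; the proofs are below) =====
def Claim_equal_hands2bin : Prop := ∀ (hands : List Int), Dom_hands2bin hands → Spec_hands2bin hands (hands2bin hands)

-- ===== LEMMAS AND PROOFS =====

/-- contribution of one card in B -/
def pvFB (c : Int) : Int := if 0 ≤ c ∧ c < 52 then 2 ^ (c + 4).toNat else 0

/-- B's guarded fold is the sum of per-card contributions. -/
lemma foldl_if_add (l : List Int) (a : Int) :
    l.foldl (fun acc c => if 0 ≤ c ∧ c < 52 then acc + 2 ^ (c + 4).toNat else acc) a
      = a + (l.map pvFB).sum := by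
  induction l generalizing a with
  | nil => simp
  | cons c l ih =>
    simp only [List.foldl_cons, List.map_cons, List.sum_cons, ih, pvFB]
    split_ifs <;> ring

/-- A's loop invariant: after n steps, output and tmp in closed form. -/
lemma A_loop (hands : List Int) (n : ℕ) (o t : Int) :
    ((List.range n).map Int.ofNat).foldl
        (fun (st : Int × Int) i => (if i ∈ hands then st.1 + st.2 else st.1, st.2 * 2)) (o, t)
      = (o + ∑ i ∈ Finset.range n, (if (i : Int) ∈ hands then t * 2 ^ i else 0), t * 2 ^ n) := by
  induction n with
  | zero => simp
  | succ n ih =>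
    rw [List.range_succ, List.map_append, List.foldl_append, ih]
    simp only [List.map_cons, List.map_nil, List.foldl_cons, List.foldl_nil,
      Finset.sum_range_succ, Prod.mk.injEq, Int.ofNat_eq_natCast]
    refine ⟨?_, by ring⟩
    split_ifs <;> ring

/-- On a duplicate-free list, the data-directed sum equals the slot-directed sum. -/
lemma B_sum (l : List Int) (h : l.Nodup) :
    (l.map pvFB).sum
      = ∑ i ∈ Finset.range 52, (if (i : Int) ∈ l then (2 : Int) ^ (i + 4) else 0) := by
  induction l with
  | nil => simp
  | cons c l ih =>
    rcases List.nodup_cons.mp h with ⟨hcl, hl⟩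
    have hsplit : ∀ i ∈ Finset.range 52,
        (if (i : Int) ∈ c :: l then (2 : Int) ^ (i + 4) else 0)
          = (if (i : Int) = c then (2 : Int) ^ (i + 4) else 0)
            + (if (i : Int) ∈ l then (2 : Int) ^ (i + 4) else 0) := by
      intro i _
      by_cases hc : (i : Int) = c
      · subst hc
        simp [hcl]
      · by_cases hil : (i : Int) ∈ l <;> simp [hc, hil]
    rw [Finset.sum_congr rfl hsplit, Finset.sum_add_distrib]
    have hone : (∑ i ∈ Finset.range 52, if (i : Int) = c then (2 : Int) ^ (i + 4) else 0)
        = pvFB c := by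
      by_cases hcr : 0 ≤ c ∧ c < 52
      · have hmem : c.toNat ∈ Finset.range 52 := by
          simp only [Finset.mem_range]; omega
        rw [Finset.sum_eq_single_of_mem c.toNat hmem]
        · have h1 : ((c.toNat : Int)) = c := Int.toNat_of_nonneg hcr.1
          have h2 : (c + 4).toNat = c.toNat + 4 := by omega
          simp [pvFB, hcr, h1, h2]
        · intro i _ hne
          have : (i : Int) ≠ c := by
            intro he; apply hne; omega
          simp [this]
      · have : ∀ i ∈ Finset.range 52, (if (i : Int) = c then (2 : Int) ^ (i + 4) else 0) = 0 := by
          intro i hi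
          simp only [Finset.mem_range] at hi
          have : (i : Int) ≠ c := by omega
          simp [this]
        rw [Finset.sum_congr rfl this]
        simp [pvFB, hcr]
    rw [hone, List.map_cons, List.sum_cons, ih hl]

/-- core equality of the two ports -/
lemma ports_eq (hands : List Int) : hands2bin hands = hands2bin_alt hands := by
  unfold hands2bin hands2bin_alt
  rw [PySem.List.pyRange_one]
  have h52 : ((52 : Int) - 0).toNat = 52 := by decide
  have hmap : (List.range (((52 : Int) - 0).toNat)).map (fun k : ℕ => (0 : Int) + (k : Int))
      = (List.range 52).map Int.ofNat := by
    rw [h52]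
    refine List.map_congr_left (fun k _ => ?_)
    simp
  rw [hmap, A_loop]
  have hcond : ((PySem.Set.ofList hands).contains 52 = true) ↔ (52 : Int) ∈ hands := by
    rw [PySem.Set.contains_iff, PySem.Set.mem_ofList]
  have hsum : (∑ i ∈ Finset.range 52,
        (if (i : Int) ∈ PySem.Set.ofList hands then (2 : Int) ^ (i + 4) else 0))
      = ∑ i ∈ Finset.range 52, (if (i : Int) ∈ hands then (16 : Int) * 2 ^ i else 0) := by
    refine Finset.sum_congr rfl ?_
    intro i _
    simp only [PySem.Set.mem_ofList]
    split_ifs with h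
    · rw [pow_add]; ring
    · rfl
  simp only [foldl_if_add, zero_add,
    B_sum (PySem.Set.ofList hands) (PySem.Set.nodup_ofList hands), hsum, hcond]
  by_cases h : (52 : Int) ∈ hands
  · simp only [if_pos h]
    ring
  · simp only [if_neg h]

-- ===== VERDICT (by name: the statement is the Claim_ definition above) =====
theorem hands2bin_spec : Claim_equal_hands2bin := by
  intro hands _
  unfold Spec_hands2bin
  exact ports_eq hands
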